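-- pv_equiv track=rewrite | github.com/ferencberes/correlation-measures | python/correlation_new/correlation_computer.py | count_ties
-- ===== SOURCE A (Python) =====
-- def count_ties(list_with_ties):
--     same_as_next = [list_with_ties[i]==list_with_ties[i+1] for i in range(len(list_with_ties)-1)]+[False]
--     count = 1
--     tie_counts = []
--     for i in range(len(list_with_ties)):
--         if same_as_next[i] == True:
--             count+=1
--         else:
--             tie_counts.extend([count for i in range(count)])
--             count =1
--     return tie_counts
-- ===== SOURCE B (Python) =====
-- def count_ties(list_with_ties):
--     # Positional two-sweep method: a forward sweep records, for every index i,
--     # the start index of its tie group; a backward sweep records the index one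
--     # past its tie group; the answer at i is ends[i] - starts[i].
--     n = len(list_with_ties)
--     starts = [0] * n
--     for i in range(1, n):
--         starts[i] = starts[i - 1] if list_with_ties[i] == list_with_ties[i - 1] else i
--     ends = [0] * n
--     for i in range(n - 1, -1, -1):
--         ends[i] = ends[i + 1] if i + 1 < n and list_with_ties[i] == list_with_ties[i + 1] else i + 1
--     return [ends[i] - starts[i] for i in range(n)]
-- ===== Notes on version B (the rewrite author's own statement) =====
-- stated objective: alternative
-- what changed: Replaces A's left-to-right block-emitting scan (a same_as_next flag list plus a run counter that extends the output with a per-run comprehension) by a positional method: a forward sweep assigns every index its run-start index, a backward sweep assigns it the index one past its run, and the result is the per-index difference ends[i]-starts[i]; no per-run emission and no counter.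
import Mathlib
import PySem

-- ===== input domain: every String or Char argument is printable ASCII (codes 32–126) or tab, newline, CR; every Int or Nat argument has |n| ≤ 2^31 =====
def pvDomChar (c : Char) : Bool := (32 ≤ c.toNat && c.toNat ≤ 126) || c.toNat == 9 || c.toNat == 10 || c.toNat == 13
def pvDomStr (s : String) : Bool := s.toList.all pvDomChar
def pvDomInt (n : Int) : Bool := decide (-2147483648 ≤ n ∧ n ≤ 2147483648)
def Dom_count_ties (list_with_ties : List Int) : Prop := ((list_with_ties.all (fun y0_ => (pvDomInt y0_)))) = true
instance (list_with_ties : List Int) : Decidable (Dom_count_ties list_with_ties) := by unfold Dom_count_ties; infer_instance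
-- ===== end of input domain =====

-- B replaces A's block-emitting scan (same_as_next flags + run counter) with a
-- positional method: forward sweep of run-start indices, backward sweep of
-- run-end indices, result = per-index difference (objective: alternative).

-- ===== PORT A =====
-- literal port of A: the same_as_next comprehension (indices are in range, so
-- list indexing is ported as getD), then the index loop with (count, tie_counts) state
def count_ties (list_with_ties : List Int) : List Int :=
  let same_as_next : List Bool :=
    ((List.range (list_with_ties.length - 1)).map
      (fun i => list_with_ties.getD i 0 == list_with_ties.getD (i + 1) 0)) ++ [false]
  ((List.range list_with_ties.length).foldl
    (fun (st : Int × List Int) i =>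
      if same_as_next.getD i false then (st.1 + 1, st.2)
      else (1, st.2 ++ (List.range st.1.toNat).map (fun _ => st.1)))
    (1, [])).2

-- ===== PORT B =====
-- forward sweep of Source B: starts[i] = starts[i-1] if l[i]==l[i-1] else i;
-- the recursion carries prev = l[i-1] and s = starts[i-1]
def startsGo : List Int → Int → Nat → Nat → List Nat
  | [], _, _, _ => []
  | v :: rest, prev, i, s =>
    let s' := if v == prev then s else i
    s' :: startsGo rest v (i + 1) s'

-- starts[0] = 0 (first loop iteration has no predecessor)
def startsOf : List Int → List Nat
  | [] => []
  | x :: xs => 0 :: startsGo xs x 1 0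

-- backward sweep of Source B: ends[i] = ends[i+1] if i+1<n and l[i]==l[i+1] else i+1;
-- built right-to-left, ends[i+1] is the head of the recursive result
def endsOf : List Int → Nat → List Nat
  | [], _ => []
  | [_], i => [i + 1]
  | v :: w :: rest, i =>
    let e := endsOf (w :: rest) (i + 1)
    (if v == w then e.headD (i + 1) else i + 1) :: e

-- final comprehension of Source B: [ends[i] - starts[i] for i in range(n)]
def count_ties_alt (list_with_ties : List Int) : List Int :=
  List.zipWith (fun e s => ((e - s : Nat) : Int)) (endsOf list_with_ties 0) (startsOf list_with_ties)

-- ===== PRECONDITION & SPEC =====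
def Spec_count_ties (list_with_ties : List Int) (out : List Int) : Prop := out = count_ties_alt list_with_ties
instance (list_with_ties : List Int) (out : List Int) : Decidable (Spec_count_ties list_with_ties out) := by unfold Spec_count_ties; infer_instance

-- ===== CLAIM (what is proved, stated in full; the proofs are below) =====
def Claim_equal_count_ties : Prop := ∀ (list_with_ties : List Int), Dom_count_ties list_with_ties → Spec_count_ties list_with_ties (count_ties list_with_ties)

-- ===== LEMMAS AND PROOFS =====

-- A's emitted block [count for i in range(count)]
def rep (c : Int) : List Int := (List.range c.toNat).map (fun _ => c)

-- A's loop body as a function of the boolean same_as_next[i]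
def stepA (st : Int × List Int) (b : Bool) : Int × List Int :=
  if b then (st.1 + 1, st.2) else (1, st.2 ++ rep st.1)

-- structural form of A's same_as_next for a nonempty list
def sameL : List Int → List Bool
  | [] => [false]
  | [_] => [false]
  | x :: y :: xs => (x == y) :: sameL (y :: xs)

-- structural form of A's loop result (count c, current value x, rest)
def E : Int → Int → List Int → List Int
  | c, _, [] => rep c
  | c, x, y :: ys => if x == y then E (c + 1) y ys else rep c ++ E 1 y ys

-- run-based recursion both sides are reduced to
def altH : List Int → List Int
  | [] => []
  | x :: xs =>
    let t := (xs.takeWhile (fun y => y == x)).length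
    List.replicate (1 + t) ((1 + t : Nat) : Int) ++ altH (xs.dropWhile (fun y => y == x))
termination_by l => l.length
decreasing_by simp; exact xs.length_dropWhile_le _

-- startsGo when the recursion stands at the START of a (new) run
def startsFrom : List Int → Nat → List Nat
  | [], _ => []
  | y :: ys, i => i :: startsGo ys y (i + 1) i

theorem foldl_index (bs : List Bool) (F : (Int × List Int) → Bool → (Int × List Int)) :
    ∀ st, (List.range bs.length).foldl (fun st i => F st (bs.getD i false)) st = bs.foldl F st := by
  induction bs with
  | nil => intro st; simp
  | cons b bs ih =>
    intro st
    rw [List.length_cons, List.range_succ_eq_map, List.foldl_cons, List.foldl_map]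
    simp only [List.getD_cons_zero, List.getD_cons_succ]
    exact ih (F st b)

theorem sameL_length : ∀ (x : Int) (xs : List Int), (sameL (x :: xs)).length = xs.length + 1 := by
  intro x xs
  induction xs generalizing x with
  | nil => simp [sameL]
  | cons y ys ih => simp [sameL, ih y]

theorem same_eq_sameL : ∀ (x : Int) (xs : List Int),
    ((List.range ((x :: xs).length - 1)).map
      (fun i => (x :: xs).getD i 0 == (x :: xs).getD (i + 1) 0)) ++ [false] = sameL (x :: xs) := by
  intro x xs
  induction xs generalizing x with
  | nil => simp [sameL]
  | cons y ys ih =>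
    rw [sameL]
    rw [show (x :: y :: ys).length - 1 = ((y :: ys).length - 1) + 1 by simp]
    rw [List.range_succ_eq_map, List.map_cons, List.map_map]
    simp only [List.getD_cons_zero, List.getD_cons_succ]
    rw [List.cons_append]
    congr 1
    exact ih y

theorem foldl_sameL : ∀ (xs : List Int) (x : Int) (c : Int) (acc : List Int),
    ((sameL (x :: xs)).foldl stepA (c, acc)).2 = acc ++ E c x xs := by
  intro xs
  induction xs with
  | nil => intro x c acc; simp [sameL, stepA, E]
  | cons y ys ih =>
    intro x c acc
    rw [show sameL (x :: y :: ys) = (x == y) :: sameL (y :: ys) from rfl, List.foldl_cons]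
    by_cases h : x == y
    · rw [show stepA (c, acc) (x == y) = (c + 1, acc) from by simp [stepA, h]]
      rw [ih y (c + 1) acc]
      simp [E, h]
    · rw [show stepA (c, acc) (x == y) = (1, acc ++ rep c) from by simp [stepA, h]]
      rw [ih y 1 (acc ++ rep c)]
      simp [E, h, List.append_assoc]

theorem rep_eq (c : Int) : rep c = List.replicate c.toNat c := by
  simp [rep, List.map_const']

theorem altH_nil : altH [] = [] := by
  simp [altH]

theorem altH_cons (x : Int) (xs : List Int) :
    altH (x :: xs) = List.replicate (1 + (xs.takeWhile (fun y => y == x)).length)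
      ((1 + (xs.takeWhile (fun y => y == x)).length : Nat) : Int) ++
      altH (xs.dropWhile (fun y => y == x)) := by
  simp [altH]

theorem E_eq_altH : ∀ (xs : List Int) (x : Int) (k : Nat),
    E ((k : Int) + 1) x xs =
      List.replicate (k + 1 + (xs.takeWhile (fun y => y == x)).length)
        ((k + 1 + (xs.takeWhile (fun y => y == x)).length : Nat) : Int) ++
      altH (xs.dropWhile (fun y => y == x)) := by
  intro xs
  induction xs with
  | nil =>
    intro x k
    have h1 : ((k : Int) + 1).toNat = k + 1 := by omega
    have h2 : ((k : Int) + 1) = ((k + 1 : Nat) : Int) := by push_cast; ring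
    rw [show E ((k : Int) + 1) x [] = rep ((k : Int) + 1) from rfl, rep_eq, h1]
    simp only [List.takeWhile_nil, List.dropWhile_nil, List.length_nil, Nat.add_zero,
      altH_nil, List.append_nil]
    rw [h2]
  | cons y ys ih =>
    intro x k
    by_cases hxy : x = y
    · subst hxy
      rw [show E ((k : Int) + 1) x (x :: ys) = E ((k : Int) + 1 + 1) x ys from by simp [E]]
      rw [show ((k : Int) + 1 + 1) = (((k + 1 : Nat) : Int) + 1) by push_cast; ring]
      rw [ih x (k + 1)]
      simp only [List.takeWhile_cons, beq_self_eq_true, if_true, List.dropWhile_cons,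
        List.length_cons]
      congr 2 <;> omega
    · have hne : (x == y) = false := beq_eq_false_iff_ne.mpr hxy
      have hyx : (y == x) = false := beq_eq_false_iff_ne.mpr (Ne.symm hxy)
      rw [show E ((k : Int) + 1) x (y :: ys)
          = rep ((k : Int) + 1) ++ E (((0 : Nat) : Int) + 1) y ys from by
        norm_num [E, hne]]
      rw [ih y 0]
      have h1 : ((k : Int) + 1).toNat = k + 1 := by omega
      have h2 : ((k : Int) + 1) = ((k + 1 : Nat) : Int) := by push_cast; ring
      rw [rep_eq, h1, h2]
      simp [hyx, altH_cons]

theorem count_ties_eq_E : ∀ (x : Int) (xs : List Int),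
    count_ties (x :: xs) = E 1 x xs := by
  intro x xs
  show ((List.range (x :: xs).length).foldl
    (fun (st : Int × List Int) i =>
      if (((List.range ((x :: xs).length - 1)).map
          (fun i => (x :: xs).getD i 0 == (x :: xs).getD (i + 1) 0)) ++ [false]).getD i false
      then (st.1 + 1, st.2)
      else (1, st.2 ++ (List.range st.1.toNat).map (fun _ => st.1)))
    (1, [])).2 = E 1 x xs
  rw [same_eq_sameL x xs]
  rw [show (x :: xs).length = (sameL (x :: xs)).length by rw [sameL_length]; simp]
  have key : ((List.range (sameL (x :: xs)).length).foldl
      (fun st i => stepA st ((sameL (x :: xs)).getD i false)) (1, ([] : List Int))).2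
      = E 1 x xs := by
    rw [foldl_index (sameL (x :: xs)) stepA (1, ([] : List Int))]
    exact foldl_sameL xs x 1 []
  exact key

-- B-side lemmas --------------------------------------------------------------

-- inside a run, startsGo keeps emitting s; at the first different element a new run starts
theorem startsGo_run : ∀ (xs : List Int) (x : Int) (i s : Nat),
    startsGo xs x i s
      = List.replicate (xs.takeWhile (fun y => y == x)).length s
        ++ startsFrom (xs.dropWhile (fun y => y == x))
             (i + (xs.takeWhile (fun y => y == x)).length) := by
  intro xs
  induction xs with
  | nil => intro x i s; simp [startsGo, startsFrom]
  | cons v ys ih =>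
    intro x i s
    by_cases h : v = x
    · subst h
      rw [show startsGo (v :: ys) v i s = s :: startsGo ys v (i + 1) s from by
        simp [startsGo]]
      rw [ih v (i + 1) s]
      simp only [List.takeWhile_cons, beq_self_eq_true, if_true, List.dropWhile_cons,
        List.length_cons]
      rw [show i + ((List.takeWhile (fun y => y == v) ys).length + 1)
          = (i + 1) + (List.takeWhile (fun y => y == v) ys).length by omega]
      rw [show (List.takeWhile (fun y => y == v) ys).length + 1
          = ((List.takeWhile (fun y => y == v) ys).length) + 1 from rfl, List.replicate_succ]
      rfl
    · have hvx : (v == x) = false := beq_eq_false_iff_ne.mpr h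
      rw [show startsGo (v :: ys) x i s = i :: startsGo ys v (i + 1) i from by
        simp [startsGo, hvx]]
      simp [hvx, startsFrom]

-- the backward sweep emits, for the whole first run, the index one past it
theorem endsOf_run : ∀ (ys : List Int) (y : Int) (i : Nat),
    endsOf (y :: ys) i
      = List.replicate (1 + (ys.takeWhile (fun z => z == y)).length)
          (i + 1 + (ys.takeWhile (fun z => z == y)).length)
        ++ endsOf (ys.dropWhile (fun z => z == y))
             (i + 1 + (ys.takeWhile (fun z => z == y)).length) := by
  intro ys
  induction ys with
  | nil => intro y i; simp [endsOf]
  | cons w zs ih =>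
    intro y i
    by_cases h : y = w
    · subst h
      rw [show endsOf (y :: y :: zs) i
          = ((endsOf (y :: zs) (i + 1)).headD (i + 1)) :: endsOf (y :: zs) (i + 1) from by
        simp [endsOf]]
      rw [ih y (i + 1)]
      simp only [List.takeWhile_cons, beq_self_eq_true, if_true, List.dropWhile_cons,
        List.length_cons]
      set t := (zs.takeWhile (fun z => z == y)).length with ht
      have hh : (List.replicate (1 + t) (i + 1 + 1 + t)
          ++ endsOf (zs.dropWhile (fun z => z == y)) (i + 1 + 1 + t)).headD (i + 1)
          = i + 1 + 1 + t := by
        rw [show 1 + t = t + 1 by omega, List.replicate_succ]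
        simp
      rw [hh]
      rw [show 1 + (t + 1) = (1 + t) + 1 by omega,
        show i + 1 + (t + 1) = i + 1 + 1 + t by omega, List.replicate_succ]
      rfl
    · have hyw : (y == w) = false := beq_eq_false_iff_ne.mpr h
      have hwy : (w == y) = false := beq_eq_false_iff_ne.mpr (Ne.symm h)
      rw [show endsOf (y :: w :: zs) i = (i + 1) :: endsOf (w :: zs) (i + 1) from by
        simp [endsOf, hyw]]
      simp [hwy]

theorem zipWith_replicate_append {α β γ : Type} (f : α → β → γ) (n : Nat) (a : α) (b : β)
    (u : List α) (v : List β) :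
    List.zipWith f (List.replicate n a ++ u) (List.replicate n b ++ v)
      = List.replicate n (f a b) ++ List.zipWith f u v := by
  induction n with
  | zero => simp
  | succ n ih => simp [List.replicate_succ, ih]

-- the positional difference over any run decomposition collapses to altH
theorem subSweeps_eq_altH : ∀ (l : List Int) (i : Nat),
    List.zipWith (fun e s => ((e - s : Nat) : Int)) (endsOf l i) (startsFrom l i) = altH l := by
  intro l
  induction l using altH.induct with
  | case1 => intro i; simp [endsOf, startsFrom, altH_nil]
  | case2 x xs ih =>
    intro i
    rw [endsOf_run xs x i]
    rw [show startsFrom (x :: xs) i = i :: startsGo xs x (i + 1) i from rfl]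
    rw [startsGo_run xs x (i + 1) i]
    rw [show (i :: (List.replicate (xs.takeWhile (fun y => y == x)).length i
        ++ startsFrom (xs.dropWhile (fun y => y == x))
             ((i + 1) + (xs.takeWhile (fun y => y == x)).length)))
        = List.replicate (1 + (xs.takeWhile (fun y => y == x)).length) i
          ++ startsFrom (xs.dropWhile (fun y => y == x))
               ((i + 1) + (xs.takeWhile (fun y => y == x)).length) from by
      rw [show 1 + (xs.takeWhile (fun y => y == x)).length
          = (xs.takeWhile (fun y => y == x)).length + 1 by omega]
      rw [List.replicate_succ]
      rfl]
    rw [show i + 1 + (xs.takeWhile (fun y => y == x)).length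
        = (i + 1) + (xs.takeWhile (fun y => y == x)).length by omega] at *
    rw [zipWith_replicate_append]
    rw [ih]
    rw [altH_cons]
    congr 2
    omega

-- ===== VERDICT (by name: the statement is the Claim_ definition above) =====
theorem count_ties_spec : Claim_equal_count_ties := by
  intro l _
  unfold Spec_count_ties count_ties_alt
  have hB : List.zipWith (fun e s => ((e - s : Nat) : Int)) (endsOf l 0) (startsOf l) = altH l := by
    cases l with
    | nil => simp [endsOf, startsOf, altH_nil]
    | cons x xs =>
      rw [show startsOf (x :: xs) = startsFrom (x :: xs) 0 from rfl]
      exact subSweeps_eq_altH (x :: xs) 0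
  rw [hB]
  cases l with
  | nil => rw [altH_nil]; rfl
  | cons x xs =>
    rw [count_ties_eq_E x xs]
    rw [show (1 : Int) = ((0 : Nat) : Int) + 1 by norm_num]
    rw [E_eq_altH xs x 0]
    rw [altH_cons]
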